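-- pv_equiv track=rewrite | github.com/mush60/altera-batch5- | Struktur Data/Problem 5/ToughTanNonagon.py | changeVocals
-- ===== SOURCE A (Python) =====
-- def changeVocals(kata):
--     new_kata = ''
--     vocals = ['a', 'i', 'e', 'u', 'o']
--     for c in kata:
--         ord_c = ord(c)
--         if c in vocals:
--             ord_c += 1
--         new_kata += chr(ord_c)
--     return new_kata
-- ===== SOURCE B (Python) =====
-- def changeVocals(kata):
--     # staged passes: one whole-string replace per vowel; correct because no
--     # replacement output ('b','f','j','p','v') is itself a vowel
--     for v in 'aeiou':
--         kata = kata.replace(v, chr(ord(v) + 1))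
--     return kata
-- ===== Notes on version B (the rewrite author's own statement) =====
-- stated objective: idiomatic
-- what changed: Replaces A's single per-character loop (membership test + repeated string concatenation) by five staged whole-string str.replace passes, one per vowel, with no explicit per-character loop or branch.
import Mathlib
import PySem

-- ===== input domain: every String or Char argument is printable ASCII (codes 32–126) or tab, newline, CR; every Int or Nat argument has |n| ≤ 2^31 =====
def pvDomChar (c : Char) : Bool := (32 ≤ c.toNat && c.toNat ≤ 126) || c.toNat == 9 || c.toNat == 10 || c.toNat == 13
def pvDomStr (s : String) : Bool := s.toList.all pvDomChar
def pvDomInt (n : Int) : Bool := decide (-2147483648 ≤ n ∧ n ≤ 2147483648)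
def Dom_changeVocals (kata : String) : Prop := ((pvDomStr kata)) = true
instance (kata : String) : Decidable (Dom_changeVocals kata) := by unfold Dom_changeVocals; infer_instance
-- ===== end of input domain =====

-- B replaces A's per-character loop by five staged whole-string replace passes,
-- one per vowel (idiomatic; correct since no replacement output is a vowel).


-- ===== PORT A =====
def changeVocals (kata : String) : String :=
  let vocals : List Char := ['a', 'i', 'e', 'u', 'o']
  kata.toList.foldl (fun newKata c =>
    let ordC := c.toNat
    let ordC := if c ∈ vocals then ordC + 1 else ordC
    newKata ++ String.singleton (Char.ofNat ordC)) ""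

-- ===== PORT B =====
-- for v in 'aeiou': kata = kata.replace(v, chr(ord(v) + 1))
def changeVocals_alt (kata : String) : String :=
  "aeiou".toList.foldl (fun s v =>
    PySem.Str.replace s (String.singleton v) (String.singleton (Char.ofNat (v.toNat + 1)))) kata

-- ===== PRECONDITION & SPEC =====
def Spec_changeVocals (kata : String) (out : String) : Prop := out = changeVocals_alt kata
instance (kata : String) (out : String) : Decidable (Spec_changeVocals kata out) := by unfold Spec_changeVocals; infer_instance

-- ===== CLAIM (what is proved, stated in full; the proofs are below) =====
def Claim_equal_changeVocals : Prop := ∀ (kata : String), Dom_changeVocals kata → Spec_changeVocals kata (changeVocals kata)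

-- ===== LEMMAS AND PROOFS =====

-- Chars.replace with a one-character pattern is the pointwise substitution
theorem pvGo_single (v w : Char) :
    ∀ (l : List Char) (fuel : Nat) (acc : List Char), l.length ≤ fuel →
      PySem.Chars.replace.go [v] [w] fuel l acc
        = acc.reverse ++ l.map (fun c => if c = v then w else c) := by
  intro l
  induction l with
  | nil =>
      intro fuel acc _
      cases fuel <;> simp [PySem.Chars.replace.go]
  | cons c t ih =>
      intro fuel acc hle
      cases fuel with
      | zero => simp at hle
      | succ n =>
        simp only [PySem.Chars.replace.go]
        by_cases hc : c = v
        · subst hc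
          rw [if_pos (by simp [List.isPrefixOf])]
          rw [show List.drop (List.length [c]) (c :: t) = t from rfl]
          rw [ih n ([w].reverse ++ acc) (by simp at hle; omega)]
          simp
        · rw [if_neg (by simp [List.isPrefixOf]; exact fun h => absurd h.symm hc)]
          rw [ih n (c :: acc) (by simp at hle; omega)]
          simp [hc]

theorem pvReplace_single (v w : Char) (s : List Char) :
    PySem.Chars.replace s [v] [w] = s.map (fun c => if c = v then w else c) := by
  rw [PySem.Chars.replace]
  simp only [List.isEmpty_cons]
  simpa using pvGo_single v w s s.length [] (Nat.le_refl _)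

-- A's per-character step
def pvStep (c : Char) : Char :=
  Char.ofNat (if c ∈ (['a', 'i', 'e', 'u', 'o'] : List Char) then c.toNat + 1 else c.toNat)

-- the composition of the five pointwise substitutions equals A's step
theorem pvCompose (c : Char) :
    ((fun c => if c = 'u' then Char.ofNat ('u'.toNat + 1) else c) ∘
        (fun c => if c = 'o' then Char.ofNat ('o'.toNat + 1) else c) ∘
          (fun c => if c = 'i' then Char.ofNat ('i'.toNat + 1) else c) ∘
            (fun c => if c = 'e' then Char.ofNat ('e'.toNat + 1) else c) ∘ fun c =>
              if c = 'a' then Char.ofNat ('a'.toNat + 1) else c) c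
      = pvStep c := by
  simp only [Function.comp]
  by_cases ha : c = 'a'; · subst ha; decide
  by_cases he : c = 'e'; · subst he; decide
  by_cases hi : c = 'i'; · subst hi; decide
  by_cases ho : c = 'o'; · subst ho; decide
  by_cases hu : c = 'u'; · subst hu; decide
  simp only [if_neg ha, if_neg he, if_neg hi, if_neg ho, if_neg hu]
  have hmem : c ∉ (['a', 'i', 'e', 'u', 'o'] : List Char) := by simp [ha, hi, he, hu, ho]
  simp [pvStep, hmem, Char.ofNat_toNat]

-- A's fold builds the pointwise map
theorem pvFoldA (l acc : List Char) :
    l.foldl (fun newKata c =>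
        let ordC := c.toNat
        let ordC := if c ∈ (['a', 'i', 'e', 'u', 'o'] : List Char) then ordC + 1 else ordC
        newKata ++ String.singleton (Char.ofNat ordC)) (String.ofList acc)
      = String.ofList (acc ++ l.map pvStep) := by
  induction l generalizing acc with
  | nil => simp
  | cons c t ih =>
      simp only [List.foldl, List.map]
      rw [show String.singleton (Char.ofNat (if c ∈ (['a', 'i', 'e', 'u', 'o'] : List Char) then c.toNat + 1 else c.toNat)) = String.ofList [pvStep c] from rfl,
        ← String.ofList_append, ih]
      simp

-- ===== VERDICT (by name: the statement is the Claim_ definition above) =====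
theorem changeVocals_spec : Claim_equal_changeVocals := by
  intro kata _
  unfold Spec_changeVocals changeVocals changeVocals_alt
  have hA := pvFoldA kata.toList []
  simp only [List.nil_append] at hA
  rw [show ("" : String) = String.ofList [] from rfl, hA]
  rw [← String.toList_inj]
  simp only [show "aeiou".toList = ['a','e','i','o','u'] by decide, List.foldl]
  simp only [PySem.Str.toList_replace, String.toList_singleton, pvReplace_single,
    String.toList_ofList, List.map_map]
  apply List.map_congr_left
  intro c _
  exact (pvCompose c).symm
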